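-- pv_equiv track=rewrite | github.com/KaneOrca/ClawSeat | core/launchers/agent-launcher-fuzzy.py | subsequence_metrics
-- ===== SOURCE A (Python) =====
-- def subsequence_metrics(text: str, query: str):
--     positions = []
--     start = 0
--     for char in query:
--         pos = text.find(char, start)
--         if pos == -1:
--             return None
--         positions.append(pos)
--         start = pos + 1
--     span = positions[-1] - positions[0] + 1
--     gap = span - len(query)
--     return gap, positions[0]
-- ===== SOURCE B (Python) =====
-- def subsequence_metrics(text: str, query: str):
--     qi = 0
--     positions = []
--     for i, ch in enumerate(text):
--         if qi < len(query) and ch == query[qi]: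
--             positions.append(i)
--             qi += 1
--     if qi < len(query):
--         return None
--     span = positions[-1] - positions[0] + 1
--     gap = span - len(query)
--     return gap, positions[0]
-- ===== Notes on version B (the rewrite author's own statement) =====
-- stated objective: idiomatic
-- what changed: B replaces A's repeated text.find(char, start) calls with a single left-to-right scan of text maintaining a pointer qi into query, appending each matched index; the final gap/first-position computation is unchanged.
-- outside the precondition, e.g. on subsequence_metrics('ab', ''): A raises IndexError, B raises IndexError
import Mathlib
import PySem

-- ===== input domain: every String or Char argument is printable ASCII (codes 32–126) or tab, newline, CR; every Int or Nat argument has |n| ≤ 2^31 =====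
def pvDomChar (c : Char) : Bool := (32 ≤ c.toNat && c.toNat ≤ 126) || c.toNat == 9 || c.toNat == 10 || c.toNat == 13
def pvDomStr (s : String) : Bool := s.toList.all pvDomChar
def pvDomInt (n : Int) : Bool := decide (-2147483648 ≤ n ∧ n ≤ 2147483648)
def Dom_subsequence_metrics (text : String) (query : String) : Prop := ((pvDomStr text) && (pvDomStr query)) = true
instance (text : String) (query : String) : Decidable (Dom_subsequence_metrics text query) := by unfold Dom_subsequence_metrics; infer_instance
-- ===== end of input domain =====

-- B replaces A's repeated text.find(char, start) calls with one explicit left-to-right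
-- scan of text driven by a pointer into query (objective: idiomatic single pass).

-- ===== PORT A =====
-- A's loop over the query characters; each step calls text.find(char, start)
-- (= PySem.Chars.findFrom) and either returns None or appends the found position.
-- After the loop: positions[-1]/positions[0] via pyGet? (none = IndexError, only for
-- an empty query, which Pre_ excludes).
def subseqALoop (t : List Char) (qlen : Nat) : List Char → Int → List Int → Option (Int × Int)
  | [], _, positions =>
    match PySem.List.pyGet? positions (-1), PySem.List.pyGet? positions 0 with
    | some lastp, some firstp => some (lastp - firstp + 1 - (qlen : Int), firstp)
    | _, _ => none
  | c :: rest, start, positions =>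
    let pos := PySem.Chars.findFrom t [c] start
    if pos = -1 then none
    else subseqALoop t qlen rest (pos + 1) (positions ++ [pos])

def subsequence_metrics (text : String) (query : String) : Option (Int × Int) :=
  subseqALoop text.toList query.toList.length query.toList 0 []

-- ===== PORT B =====
-- B's per-character step: if qi < len(query) and ch == query[qi], record the index.
def subseqBStep (q : List Char) (st : Nat × List Int) (p : Int × Char) : Nat × List Int :=
  match q[st.1]? with
  | some c => if p.2 = c then (st.1 + 1, st.2 ++ [p.1]) else st
  | none => st

def subsequence_metrics_alt (text : String) (query : String) : Option (Int × Int) :=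
  let q := query.toList
  let r := (PySem.List.enumerate text.toList 0).foldl (subseqBStep q) (0, [])
  if r.1 < q.length then none
  else
    match PySem.List.pyGet? r.2 (-1), PySem.List.pyGet? r.2 0 with
    | some lastp, some firstp => some (lastp - firstp + 1 - (q.length : Int), firstp)
    | _, _ => none

-- ===== PRECONDITION & SPEC =====
-- Pre_ excludes only the empty query, on which Python A raises IndexError
-- (positions[-1] on an empty list); B raises the same way there.
def Pre_subsequence_metrics (text : String) (query : String) : Prop := query ≠ ""
instance (text : String) (query : String) : Decidable (Pre_subsequence_metrics text query) := by unfold Pre_subsequence_metrics; infer_instance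
def pvWitness_subsequence_metrics : String × String := ("abracadabra", "acad")

def Spec_subsequence_metrics (text : String) (query : String) (out : Option (Int × Int)) : Prop := out = subsequence_metrics_alt text query
instance (text : String) (query : String) (out : Option (Int × Int)) : Decidable (Spec_subsequence_metrics text query out) := by unfold Spec_subsequence_metrics; infer_instance

-- ===== CLAIM (what is proved, stated in full; the proofs are below) =====
def Claim_equal_subsequence_metrics : Prop := ∀ (text : String) (query : String), Dom_subsequence_metrics text query → Pre_subsequence_metrics text query → Spec_subsequence_metrics text query (subsequence_metrics text query)

-- ===== LEMMAS AND PROOFS =====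

-- [c] is a prefix of l iff l starts with c.
theorem pv_singleton_prefix_iff {c : Char} {l : List Char} : [c] <+: l ↔ l[0]? = some c := by
  cases l with
  | nil => simp
  | cons x xs => simp [List.cons_prefix_cons]; tauto

-- [c] is an infix of l iff c ∈ l.
theorem pv_singleton_infix_iff {c : Char} {l : List Char} : [c] <:+: l ↔ c ∈ l := by
  constructor
  · rintro ⟨s, t, rfl⟩; simp
  · intro h
    obtain ⟨s, t, rfl⟩ := List.append_of_mem h
    exact ⟨s, t, by simp⟩

-- If no element of the folded list can match q[qi], the fold leaves the state alone.
theorem pv_foldl_skip (q : List Char) (qi : Nat)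
    (l : List (Int × Char))
    (h : ∀ p ∈ l, ∀ c, q[qi]? = some c → p.2 ≠ c) :
    ∀ acc : List Int, l.foldl (subseqBStep q) (qi, acc) = (qi, acc) := by
  induction l with
  | nil => intro acc; rfl
  | cons p l ih =>
    intro acc
    have hstep : subseqBStep q (qi, acc) p = (qi, acc) := by
      unfold subseqBStep
      cases hq : q[qi]? with
      | none => simp
      | some c =>
        have := h p (by simp) c hq
        simp [this]
    rw [List.foldl_cons, hstep]
    exact ih (fun p hp => h p (by simp [hp])) acc

-- The bridge: A's find-driven loop, started at query position qi and text position k,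
-- equals B's single scan of the remaining text (as one big fold over enumerate).
theorem pv_bridge (t q : List Char) :
    ∀ (qrem : List Char) (qi k : Nat) (acc : List Int),
      q.drop qi = qrem → k ≤ t.length →
      subseqALoop t q.length qrem (k : Int) acc =
        (let r := (PySem.List.enumerate (t.drop k) (k : Int)).foldl (subseqBStep q) (qi, acc)
         if r.1 < q.length then none
         else
           match PySem.List.pyGet? r.2 (-1), PySem.List.pyGet? r.2 0 with
           | some lastp, some firstp => some (lastp - firstp + 1 - (q.length : Int), firstp)
           | _, _ => none) := by
  intro qrem
  induction qrem with
  | nil =>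
    intro qi k acc hdrop hk
    have hlen : q.length ≤ qi := List.drop_eq_nil_iff.mp hdrop
    have hnone : q[qi]? = none := by simp [List.getElem?_eq_none_iff]; omega
    have hr := pv_foldl_skip q qi (PySem.List.enumerate (t.drop k) (k : Int))
      (fun p _ c hc => by simp [hnone] at hc) acc
    simp only [hr]
    have : ¬ (qi < q.length) := by omega
    simp only [this, if_false]
    rfl
  | cons c rest ih =>
    intro qi k acc hdrop hk
    have hget : q[qi]? = some c := by
      have h0 : (q.drop qi)[0]? = q[qi]? := by
        simp [List.getElem?_drop]
      rw [← h0, hdrop]; rfl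
    have hqi : qi < q.length := by
      rcases List.getElem?_eq_some_iff.mp hget with ⟨h, _⟩; exact h
    have hrest : q.drop (qi + 1) = rest := by
      have : q.drop (qi + 1) = (q.drop qi).drop 1 := by
        rw [List.drop_drop]
      rw [this, hdrop]; rfl
    show (if PySem.Chars.findFrom t [c] (k : Int) = -1 then none
          else subseqALoop t q.length rest (PySem.Chars.findFrom t [c] (k : Int) + 1)
                 (acc ++ [PySem.Chars.findFrom t [c] (k : Int)])) = _
    by_cases hpos : PySem.Chars.findFrom t [c] (k : Int) = -1
    · -- find fails: A returns none; B never advances qi so qi < len(query) at the end.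
      have hnotin : c ∉ t.drop k := by
        have := (PySem.Chars.findFrom_natCast_eq_neg_one_iff t [c] k hk).mp hpos
        exact fun hc => this (pv_singleton_infix_iff.mpr hc)
      have hr := pv_foldl_skip q qi (PySem.List.enumerate (t.drop k) (k : Int))
        (fun p hp c' hc' => by
          rcases (PySem.List.mem_enumerate_iff _ _ _).mp hp with ⟨j, hj, rfl⟩
          rw [hget] at hc'; cases hc'
          intro hpc
          exact hnotin (hpc ▸ List.getElem_mem hj)) acc
      simp only [hpos, if_true, hr, hqi, if_true]
    · -- find succeeds at position pn.
      obtain ⟨hkle, hpref, hmin⟩ := PySem.Chars.findFrom_natCast_spec t [c] k hk hpos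
      set pos := PySem.Chars.findFrom t [c] (k : Int) with hposdef
      have hpos0 : 0 ≤ pos := le_trans (by exact_mod_cast Int.ofNat_nonneg k) hkle
      set pn := pos.toNat with hpn
      have hposeq : pos = (pn : Int) := by omega
      have hkpn : k ≤ pn := by omega
      have hat : t[pn]? = some c := by
        have := pv_singleton_prefix_iff.mp hpref
        rwa [List.getElem?_drop, Nat.add_zero] at this
      have hpnlt : pn < t.length := (List.getElem?_eq_some_iff.mp hat).1
      -- decompose t.drop k = middle ++ c :: t.drop (pn+1)
      have hdpn : t.drop pn = c :: t.drop (pn + 1) := by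
        rcases List.getElem?_eq_some_iff.mp hat with ⟨h, hval⟩
        rw [List.drop_eq_getElem_cons h, hval]
      have hsplit : t.drop k = (t.drop k).take (pn - k) ++ (c :: t.drop (pn + 1)) := by
        rw [← hdpn]
        have : (t.drop k).drop (pn - k) = t.drop pn := by
          rw [List.drop_drop]; congr 1; omega
        rw [← this, List.take_append_drop]
      have hmidlen : ((t.drop k).take (pn - k)).length = pn - k := by
        rw [List.length_take, List.length_drop]; omega
      have hmid : ∀ p ∈ PySem.List.enumerate ((t.drop k).take (pn - k)) (k : Int),
          ∀ c', q[qi]? = some c' → p.2 ≠ c' := by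
        intro p hp c' hc'
        rw [hget] at hc'; cases hc'
        rcases (PySem.List.mem_enumerate_iff _ _ _).mp hp with ⟨j, hj, rfl⟩
        intro hpc
        have hjlt : j < pn - k := by
          have := hj; rwa [hmidlen] at this
        have hjv : ((t.drop k).take (pn - k))[j] = t[k + j]'(by omega) := by
          rw [List.getElem_take, List.getElem_drop]
        have hpc2 : t[k + j]'(by omega) = c := by
          have h1 : ((t.drop k).take (pn - k))[j] = c := by simpa using hpc
          rwa [hjv] at h1
        have hnp : ¬ [c] <+: t.drop (k + j) := hmin (k + j) (by omega) (by omega)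
        apply hnp
        rw [pv_singleton_prefix_iff, List.getElem?_drop, Nat.add_zero,
          List.getElem?_eq_getElem (by omega : k + j < t.length), hpc2]
      -- run the fold through the three segments
      have hfold :
          (PySem.List.enumerate (t.drop k) (k : Int)).foldl (subseqBStep q) (qi, acc) =
          (PySem.List.enumerate (t.drop (pn + 1)) ((pn + 1 : Nat) : Int)).foldl
            (subseqBStep q) (qi + 1, acc ++ [(pn : Int)]) := by
        conv_lhs => rw [hsplit]
        rw [PySem.List.enumerate_append, List.foldl_append]
        rw [pv_foldl_skip q qi _ hmid acc]
        rw [hmidlen, PySem.List.enumerate_cons, List.foldl_cons]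
        have hstep : subseqBStep q (qi, acc) ((k : Int) + (pn - k : Nat), c)
            = (qi + 1, acc ++ [(pn : Int)]) := by
          unfold subseqBStep
          simp only [hget]
          have : ((k : Int) + ((pn - k : Nat) : Int)) = (pn : Int) := by omega
          simp [this]
        rw [hstep]
        congr 1
        · congr 1; omega
      rw [if_neg hpos]
      have harith : pos + 1 = ((pn + 1 : Nat) : Int) := by omega
      have hacc : acc ++ [pos] = acc ++ [(pn : Int)] := by rw [hposeq]
      rw [harith, hacc,
        ih (qi + 1) (pn + 1) (acc ++ [(pn : Int)]) hrest (by omega)]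
      simp only [hfold]

-- ===== VERDICT (by name: the statement is the Claim_ definition above) =====
theorem subsequence_metrics_spec : Claim_equal_subsequence_metrics := by
  intro text query _ _
  unfold Spec_subsequence_metrics subsequence_metrics subsequence_metrics_alt
  have := pv_bridge text.toList query.toList query.toList 0 0 [] rfl (by omega)
  simpa using this
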